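-- pv_equiv track=rewrite | github.com/Emon69420/NaviGit | services/rag_system.py | parse_gitingest_content
-- ===== SOURCE A (Python) =====
-- from typing import Dict, List, Optional, Any, Tuple
--
-- def parse_gitingest_content(content: str) -> Dict[str, str]:
--     """Parse gitingest content and extract files"""
--     files = {}
--     lines = content.split('\n')
--
--     current_file = None
--     current_content = []
--     in_file_section = False
--
--     for line in lines:
--         # Detect file headers
--         if line.startswith('FILE: '):
--             # Save previous file
--             if current_file and current_content:
--                 # Remove empty lines at the end
--                 while current_content and not current_content[-1].strip():
--                     current_content.pop()
--                 files[current_file] = '\n'.join(current_content)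
--
--             # Start new file
--             current_file = line.replace('FILE: ', '').strip()
--             current_content = []
--             in_file_section = True
--
--         elif line.startswith('=') and len(line) > 10:
--             # Skip separator lines
--             continue
--
--         elif line.startswith('Directory structure:'):
--             # Skip directory structure section
--             in_file_section = False
--             current_file = None
--
--         elif in_file_section and current_file:
--             # Add content line
--             current_content.append(line)
--
--     # Add last file
--     if current_file and current_content:
--         while current_content and not current_content[-1].strip():
--             current_content.pop()
--         files[current_file] = '\n'.join(current_content)
--
--     return files
-- ===== SOURCE B (Python) =====
-- def parse_gitingest_content(content: str) -> dict:
--     """Block-based parse: locate FILE: headers, then process each block independently."""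
--     files = {}
--     lines = content.split('\n')
--     n = len(lines)
--     i = 0
--     # ignore everything before the first header
--     while i < n and not lines[i].startswith('FILE: '):
--         i += 1
--     while i < n:
--         name = lines[i].replace('FILE: ', '').strip()
--         i += 1
--         block = []
--         while i < n and not lines[i].startswith('FILE: '):
--             block.append(lines[i])
--             i += 1
--         if not name:
--             continue
--         # a 'Directory structure:' line abandons the whole block
--         if any(l.startswith('Directory structure:') for l in block):
--             continue
--         body = [l for l in block if not (l.startswith('=') and len(l) > 10)]
--         if not body:
--             continue
--         while body and not body[-1].strip():
--             body.pop()
--         files[name] = '\n'.join(body)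
--     return files
-- ===== Notes on version B (the rewrite author's own statement) =====
-- stated objective: alternative
-- what changed: Replaces A's single stateful line-by-line scan (current_file/in_file_section flags) by a block decomposition: skip the prologue, carve the lines into FILE:-header blocks, and decide each block independently (discard on a 'Directory structure:' line, filter separators, rstrip trailing blanks).
import Mathlib
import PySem

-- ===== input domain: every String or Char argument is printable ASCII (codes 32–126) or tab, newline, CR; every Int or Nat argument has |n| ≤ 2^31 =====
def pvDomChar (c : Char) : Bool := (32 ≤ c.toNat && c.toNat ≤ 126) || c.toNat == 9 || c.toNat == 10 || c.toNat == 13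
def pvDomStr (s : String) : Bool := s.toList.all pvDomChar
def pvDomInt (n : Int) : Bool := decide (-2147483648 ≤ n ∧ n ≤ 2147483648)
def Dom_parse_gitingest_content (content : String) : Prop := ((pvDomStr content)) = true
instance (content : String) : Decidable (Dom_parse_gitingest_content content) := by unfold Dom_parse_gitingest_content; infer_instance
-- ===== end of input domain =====

-- B replaces A's stateful line scan by a block decomposition (skip prologue, carve into
-- FILE: blocks, decide each block independently); same cost, different structure.


-- shared helper: the identical `while content and not content[-1].strip(): content.pop()`
-- loop that appears verbatim in both Pythons (drop trailing blank lines)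
def pvPopBlank : List String → List String
  | [] => []
  | l :: ls =>
    match pvPopBlank ls with
    | [] => if PySem.Str.strip l = "" then [] else [l]
    | r => l :: r

-- ===== PORT A =====
-- truthiness of `current_file` (None or empty string is falsy)
def pvTruthy : Option String → Bool
  | some f => f ≠ ""
  | none => false

-- `if current_file and current_content: …pop…; files[current_file] = '\n'.join(...)`
def pvSave (files : PySem.Dict String String) (cur : Option String)
    (content : List String) : PySem.Dict String String :=
  if pvTruthy cur ∧ content ≠ [] then
    files.insert (cur.getD "") (PySem.Str.join "\n" (pvPopBlank content))
  else files

-- one iteration of A's for-loop; state = (files, current_file, current_content, in_file_section)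
def pvStepA (st : PySem.Dict String String × Option String × List String × Bool)
    (line : String) : PySem.Dict String String × Option String × List String × Bool :=
  let (files, cur, content, inSec) := st
  if PySem.Str.startswith line "FILE: " then
    (pvSave files cur content,
     some (PySem.Str.strip (PySem.Str.replace line "FILE: " "")), [], true)
  else if PySem.Str.startswith line "=" && decide (PySem.Str.len line > 10) then st
  else if PySem.Str.startswith line "Directory structure:" then (files, none, content, false)
  else if inSec && pvTruthy cur then (files, cur, content ++ [line], inSec)
  else st

def parse_gitingest_content (content : String) : List (String × String) :=
  let lines := (PySem.Str.split? content "\n").getD []  -- sep "\n" ≠ "", so split? is always some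
  let st := lines.foldl pvStepA (PySem.Dict.empty, none, [], false)
  (pvSave st.1 st.2.1 st.2.2.1).items

-- ===== PORT B =====
-- `while i < n and not lines[i].startswith('FILE: '): i += 1` (skip the prologue)
def pvDropPrologue : List String → List String
  | [] => []
  | l :: ls => if PySem.Str.startswith l "FILE: " then l :: ls else pvDropPrologue ls

-- the inner while collecting `block` up to the next header: (block, rest)
def pvSpanBlock : List String → List String × List String
  | [] => ([], [])
  | l :: ls =>
    if PySem.Str.startswith l "FILE: " then ([], l :: ls)
    else
      let (b, r) := pvSpanBlock ls
      (l :: b, r)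

theorem pvSpanBlock_rest_le (ls : List String) : (pvSpanBlock ls).2.length ≤ ls.length := by
  induction ls with
  | nil => simp [pvSpanBlock]
  | cons l ls ih =>
    simp only [pvSpanBlock]
    split
    · simp
    · simpa using Nat.le_succ_of_le ih

-- the outer `while i < n:` loop, one iteration per FILE: block
def pvParseBlocks (files : PySem.Dict String String) :
    List String → PySem.Dict String String
  | [] => files
  | header :: ls =>
    let block := (pvSpanBlock ls).1
    let rest := (pvSpanBlock ls).2
    let name := PySem.Str.strip (PySem.Str.replace header "FILE: " "")
    let files' :=
      if name = "" then files
      else if block.any (fun l => PySem.Str.startswith l "Directory structure:") then files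
      else
        let body := block.filter
          (fun l => !(PySem.Str.startswith l "=" && decide (PySem.Str.len l > 10)))
        if body = [] then files
        else files.insert name (PySem.Str.join "\n" (pvPopBlank body))
    pvParseBlocks files' rest
  termination_by ls => ls.length
  decreasing_by
    exact Nat.lt_succ_of_le (pvSpanBlock_rest_le ls)

def parse_gitingest_content_alt (content : String) : List (String × String) :=
  let lines := (PySem.Str.split? content "\n").getD []  -- sep "\n" ≠ "", so split? is always some
  (pvParseBlocks PySem.Dict.empty (pvDropPrologue lines)).items

-- ===== PRECONDITION & SPEC =====
def Spec_parse_gitingest_content (content : String) (out : List (String × String)) : Prop := out = parse_gitingest_content_alt content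
instance (content : String) (out : List (String × String)) : Decidable (Spec_parse_gitingest_content content out) := by unfold Spec_parse_gitingest_content; infer_instance

-- ===== CLAIM (what is proved, stated in full; the proofs are below) =====
def Claim_equal_parse_gitingest_content : Prop := ∀ (content : String), Dom_parse_gitingest_content content → Spec_parse_gitingest_content content (parse_gitingest_content content)

-- ===== LEMMAS AND PROOFS =====

def pvIsFile (l : String) : Bool := PySem.Str.startswith l "FILE: "
def pvIsDir (l : String) : Bool := PySem.Str.startswith l "Directory structure:"
def pvIsSep (l : String) : Bool := PySem.Str.startswith l "=" && decide (PySem.Str.len l > 10)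

theorem pvSep_not_dir (l : String) (h : PySem.Str.startswith l "=" = true) :
    PySem.Str.startswith l "Directory structure:" = false := by
  simp only [PySem.Str.startswith_eq] at h ⊢
  rw [PySem.Chars.startswith_iff] at h
  rw [← Bool.not_eq_true, PySem.Chars.startswith_iff]
  intro hcon
  rcases h with ⟨t1, h1⟩; rcases hcon with ⟨t2, h2⟩
  rw [← h1] at h2
  simp at h2

-- dead state: once cur = none and inSec = false, non-FILE lines change nothing
theorem pvDead (ls : List String) (d : PySem.Dict String String) (c : List String)
    (h : ∀ l ∈ ls, pvIsFile l = false) :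
    ls.foldl pvStepA (d, none, c, false) = (d, none, c, false) := by
  induction ls with
  | nil => rfl
  | cons l ls ih =>
    have hl : PySem.Str.startswith l "FILE: " = false := by
      simpa [pvIsFile] using h l (by simp)
    have hs : pvStepA (d, none, c, false) l = (d, none, c, false) := by
      simp only [pvStepA, hl, pvTruthy]
      split_ifs <;> simp_all
    simp only [List.foldl_cons, hs]
    exact ih (fun x hx => h x (by simp [hx]))

-- live state, no Directory line: content lines accumulate (separators filtered)
theorem pvLive (ls : List String) (d : PySem.Dict String String) (name : String)
    (c : List String) (hname : name ≠ "")
    (hf : ∀ l ∈ ls, pvIsFile l = false) (hd : ∀ l ∈ ls, pvIsDir l = false) :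
    ls.foldl pvStepA (d, some name, c, true)
      = (d, some name, c ++ ls.filter (fun l => !pvIsSep l), true) := by
  induction ls generalizing c with
  | nil => simp
  | cons l ls ih =>
    have hlf : PySem.Str.startswith l "FILE: " = false := by
      simpa [pvIsFile] using hf l (by simp)
    have hld : PySem.Str.startswith l "Directory structure:" = false := by
      simpa [pvIsDir] using hd l (by simp)
    simp at hlf hld
    have hf' : ∀ x ∈ ls, pvIsFile x = false := fun x hx => hf x (by simp [hx])
    have hd' : ∀ x ∈ ls, pvIsDir x = false := fun x hx => hd x (by simp [hx])
    by_cases hsep : pvIsSep l = true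
    · have hs : pvStepA (d, some name, c, true) l = (d, some name, c, true) := by
        have h2 := hsep
        simp only [pvIsSep] at h2
        simp at h2
        simp [pvStepA, hlf, h2]
      simp only [List.foldl_cons, hs, List.filter_cons, hsep]
      simpa using ih c hf' hd'
    · have hsep0 : pvIsSep l = false := by simpa using hsep
      have hs : pvStepA (d, some name, c, true) l = (d, some name, c ++ [l], true) := by
        have h2 := hsep0
        simp only [pvIsSep] at h2
        simp at h2
        simp [pvStepA, hlf, hld, pvTruthy, hname]
        exact h2
      simp only [List.foldl_cons, hs, List.filter_cons, hsep0]
      rw [ih (c ++ [l]) hf' hd']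
      simp
    

-- empty filename: nothing is ever collected or saved
theorem pvEmptyName (ls : List String) (d : PySem.Dict String String) (c : List String)
    (hf : ∀ l ∈ ls, pvIsFile l = false) :
    ∃ cur' s', ls.foldl pvStepA (d, some "", c, true) = (d, cur', c, s')
      ∧ pvTruthy cur' = false := by
  induction ls with
  | nil => exact ⟨some "", true, rfl, by simp [pvTruthy]⟩
  | cons l ls ih =>
    have hlf : PySem.Str.startswith l "FILE: " = false := by
      simpa [pvIsFile] using hf l (by simp)
    simp at hlf
    have hf' : ∀ x ∈ ls, pvIsFile x = false := fun x hx => hf x (by simp [hx])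
    by_cases hld : PySem.Str.startswith l "Directory structure:" = true
    · simp at hld
      have hs : pvStepA (d, some "", c, true) l = (d, none, c, false) := by
        by_cases hsep : (PySem.Str.startswith l "=" && decide (PySem.Str.len l > 10)) = true
        · exfalso
          have := pvSep_not_dir l (by simpa using (Bool.and_elim_left hsep))
          simp at this
          simp [this] at hld
        · simp at hsep
          simp [pvStepA, hlf, hld]
          exact hsep
      simp only [List.foldl_cons, hs, pvDead ls d c hf']
      exact ⟨none, false, rfl, rfl⟩
    · simp at hld
      have hs : pvStepA (d, some "", c, true) l = (d, some "", c, true) := by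
        simp [pvStepA, hlf, hld, pvTruthy]
      simp only [List.foldl_cons, hs]
      exact ih hf'

-- a Directory line abandons the block
theorem pvDirKills (ls : List String) (d : PySem.Dict String String) (name : String)
    (c : List String) (hf : ∀ l ∈ ls, pvIsFile l = false)
    (hd : ls.any pvIsDir = true) :
    ∃ c', ls.foldl pvStepA (d, some name, c, true) = (d, none, c', false) := by
  induction ls generalizing c with
  | nil => simp at hd
  | cons l ls ih =>
    have hlf : PySem.Str.startswith l "FILE: " = false := by
      simpa [pvIsFile] using hf l (by simp)
    simp at hlf
    have hf' : ∀ x ∈ ls, pvIsFile x = false := fun x hx => hf x (by simp [hx])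
    by_cases hld : PySem.Str.startswith l "Directory structure:" = true
    · simp at hld
      have hs : pvStepA (d, some name, c, true) l = (d, none, c, false) := by
        by_cases hsep : (PySem.Str.startswith l "=" && decide (PySem.Str.len l > 10)) = true
        · exfalso
          have := pvSep_not_dir l (by simpa using (Bool.and_elim_left hsep))
          simp at this
          simp [this] at hld
        · simp at hsep
          simp [pvStepA, hlf, hld]
          exact hsep
      simp only [List.foldl_cons, hs, pvDead ls d c hf']
      exact ⟨c, rfl⟩
    · have hd' : ls.any pvIsDir = true := by
        have hl0 : pvIsDir l = false := by simp [pvIsDir]; simpa using hld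
        simpa [hl0] using hd
      have hld0 : PySem.Chars.startswith l.toList "Directory structure:".toList = false := by
        simpa using hld
      simp at hld0
      have hs : ∃ c2, pvStepA (d, some name, c, true) l = (d, some name, c2, true) := by
        by_cases hsep : (PySem.Str.startswith l "=" && decide (PySem.Str.len l > 10)) = true
        · have h2 := hsep; simp at h2
          exact ⟨c, by simp [pvStepA, hlf, h2]⟩
        · have h2 := hsep; simp at h2
          by_cases ht : pvTruthy (some name) = true
          · refine ⟨c ++ [l], ?_⟩
            simp [pvStepA, hlf, hld0, ht]
            exact h2
          · simp at ht
            refine ⟨c, ?_⟩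
            simp [pvStepA, hlf, hld0, ht]
      obtain ⟨c2, hs⟩ := hs
      simp only [List.foldl_cons, hs]
      exact ih c2 hf' hd'

-- the combined effect of one block on A's machine
theorem pvBlockLemma (block : List String) (d : PySem.Dict String String) (name : String)
    (hf : ∀ l ∈ block, pvIsFile l = false) :
    ∃ cur' c' s', block.foldl pvStepA (d, some name, [], true) = (d, cur', c', s')
      ∧ pvSave d cur' c' =
        (if name = "" then d
         else if block.any pvIsDir then d
         else
           let body := block.filter (fun l => !pvIsSep l)
           if body = [] then d
           else d.insert name (PySem.Str.join "\n" (pvPopBlank body))) := by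
  by_cases hname : name = ""
  · subst hname
    obtain ⟨cur', s', hfold, ht⟩ := pvEmptyName block d [] hf
    exact ⟨cur', [], s', hfold, by simp [pvSave, ht]⟩
  · by_cases hdir : block.any pvIsDir = true
    · obtain ⟨c', hfold⟩ := pvDirKills block d name [] hf hdir
      exact ⟨none, c', false, hfold, by simp [pvSave, pvTruthy, hname, hdir]⟩
    · have hd : ∀ l ∈ block, pvIsDir l = false := by
        intro l hl
        by_contra hc
        simp only [Bool.not_eq_false] at hc
        exact hdir (List.any_eq_true.mpr ⟨l, hl, hc⟩)
      have hfold := pvLive block d name [] hname hf hd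
      refine ⟨some name, block.filter (fun l => !pvIsSep l), true, by simpa using hfold, ?_⟩
      simp only [hname, hdir, if_false]
      by_cases hb : block.filter (fun l => !pvIsSep l) = []
      · simp [pvSave, hb]
      · simp [pvSave, pvTruthy, hname, hb]

theorem pvSpan_append (ls : List String) :
    (pvSpanBlock ls).1 ++ (pvSpanBlock ls).2 = ls := by
  induction ls with
  | nil => rfl
  | cons l ls ih =>
    simp only [pvSpanBlock]
    split
    · rfl
    · simpa using ih

theorem pvSpan_fst_no_file (ls : List String) :
    ∀ l ∈ (pvSpanBlock ls).1, pvIsFile l = false := by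
  induction ls with
  | nil => simp [pvSpanBlock]
  | cons l ls ih =>
    simp only [pvSpanBlock]
    split
    · simp
    · rename_i hne
      intro x hx
      rcases (by simpa using hx : x = l ∨ x ∈ (pvSpanBlock ls).1) with rfl | hx'
      · simpa [pvIsFile] using hne
      · exact ih x hx'

theorem pvSpan_snd_shape (ls : List String) :
    (pvSpanBlock ls).2 = [] ∨ ∃ h t, (pvSpanBlock ls).2 = h :: t ∧ pvIsFile h = true := by
  induction ls with
  | nil => exact Or.inl rfl
  | cons l ls ih =>
    simp only [pvSpanBlock]
    split
    · rename_i hl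
      exact Or.inr ⟨l, ls, rfl, by simpa [pvIsFile] using hl⟩
    · simpa using ih

theorem pvDropPrologue_split (ls : List String) :
    ∃ pre, ls = pre ++ pvDropPrologue ls ∧ ∀ l ∈ pre, pvIsFile l = false := by
  induction ls with
  | nil => exact ⟨[], rfl, by simp⟩
  | cons l ls ih =>
    simp only [pvDropPrologue]
    split
    · exact ⟨[], rfl, by simp⟩
    · rename_i hne
      obtain ⟨pre, heq, hpre⟩ := ih
      refine ⟨l :: pre, by simpa using heq, ?_⟩
      intro x hx
      rcases (by simpa using hx : x = l ∨ x ∈ pre) with rfl | hx'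
      · simpa [pvIsFile] using hne
      · exact hpre x hx'

theorem pvDropPrologue_shape (ls : List String) :
    pvDropPrologue ls = [] ∨ ∃ h t, pvDropPrologue ls = h :: t ∧ pvIsFile h = true := by
  induction ls with
  | nil => exact Or.inl rfl
  | cons l ls ih =>
    simp only [pvDropPrologue]
    split
    · rename_i hl
      exact Or.inr ⟨l, ls, rfl, by simpa [pvIsFile] using hl⟩
    · exact ih

theorem pvMainAux (n : Nat) : ∀ (ls : List String) (d : PySem.Dict String String),
    ls.length ≤ n →
    (ls = [] ∨ ∃ h t, ls = h :: t ∧ pvIsFile h = true) →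
    (let st := ls.foldl pvStepA (d, none, [], false)
     pvSave st.1 st.2.1 st.2.2.1) = pvParseBlocks d ls := by
  induction n with
  | zero =>
    intro ls d hlen _
    have : ls = [] := List.length_eq_zero_iff.mp (Nat.le_zero.mp hlen)
    subst this
    simp [pvParseBlocks, pvSave, pvTruthy]
  | succ n ih =>
    intro ls d hlen hshape
    rcases hshape with rfl | ⟨h, t, rfl, hFile⟩
    · simp [pvParseBlocks, pvSave, pvTruthy]
    · have hF : PySem.Str.startswith h "FILE: " = true := by simpa [pvIsFile] using hFile
      simp at hF
      have hstep : ∀ (st : PySem.Dict String String × Option String × List String × Bool),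
          pvStepA st h = (pvSave st.1 st.2.1 st.2.2.1,
            some (PySem.Str.strip (PySem.Str.replace h "FILE: " "")), [], true) := by
        intro st
        obtain ⟨a, b, c0, e⟩ := st
        simp [pvStepA, hF]
      obtain ⟨cur', c', s', hfold, hsave⟩ :=
        pvBlockLemma (pvSpanBlock t).1 d
          (PySem.Str.strip (PySem.Str.replace h "FILE: " "")) (pvSpan_fst_no_file t)
      have hRHS : pvParseBlocks d (h :: t)
          = pvParseBlocks (pvSave d cur' c') (pvSpanBlock t).2 := by
        rw [pvParseBlocks, hsave]
        rfl
      rw [hRHS]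
      simp only [List.foldl_cons, hstep]
      have hsave0 : ∀ d0 : PySem.Dict String String, pvSave d0 (none : Option String) [] = d0 := by
        intro d0; simp [pvSave, pvTruthy]
      rw [hsave0]
      conv_lhs => rw [← pvSpan_append t, List.foldl_append, hfold]
      rcases pvSpan_snd_shape t with hemp | ⟨h2, t2, heq, hFile2⟩
      · rw [hemp]
        simp [pvParseBlocks, hsave]
      · rw [heq]
        have hF2 : PySem.Chars.startswith h2.toList "FILE: ".toList = true := by
          simpa [pvIsFile] using hFile2
        simp at hF2
        have hstep2 : ∀ (st : PySem.Dict String String × Option String × List String × Bool),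
            pvStepA st h2 = (pvSave st.1 st.2.1 st.2.2.1,
              some (PySem.Str.strip (PySem.Str.replace h2 "FILE: " "")), [], true) := by
          intro st
          obtain ⟨a, b, c0, e⟩ := st
          simp [pvStepA, hF2]
        have hlen2 : (h2 :: t2).length ≤ n := by
          have h1 : (pvSpanBlock t).2.length ≤ t.length := pvSpanBlock_rest_le t
          rw [heq] at h1
          simp at hlen
          omega
        have := ih (h2 :: t2) (pvSave d cur' c') hlen2
          (Or.inr ⟨h2, t2, rfl, hFile2⟩)
        simp only [List.foldl_cons, hstep2] at this ⊢
        rw [hsave0] at this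
        exact this

-- main: from a header-first (or empty) suffix, A's machine finished = B's block loop
theorem pvMain (ls : List String) (d : PySem.Dict String String)
    (hshape : ls = [] ∨ ∃ h t, ls = h :: t ∧ pvIsFile h = true) :
    (let st := ls.foldl pvStepA (d, none, [], false)
     pvSave st.1 st.2.1 st.2.2.1) = pvParseBlocks d ls :=
  pvMainAux ls.length ls d le_rfl hshape

-- ===== VERDICT (by name: the statement is the Claim_ definition above) =====
theorem parse_gitingest_content_spec : Claim_equal_parse_gitingest_content := by
  intro content _
  unfold Spec_parse_gitingest_content parse_gitingest_content parse_gitingest_content_alt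
  obtain ⟨pre, heq, hpre⟩ := pvDropPrologue_split ((PySem.Str.split? content "\n").getD [])
  simp only
  have h2 : ((PySem.Str.split? content "\n").getD []).foldl pvStepA
      (PySem.Dict.empty, none, [], false)
      = (pvDropPrologue ((PySem.Str.split? content "\n").getD [])).foldl pvStepA
        (PySem.Dict.empty, none, [], false) := by
    conv_lhs => rw [heq]
    rw [List.foldl_append, pvDead pre _ _ hpre]
  rw [h2, pvMain _ _ (pvDropPrologue_shape _)]
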